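-- pv_equiv track=rewrite | github.com/Leb0wsKy/Golden_Retriever | ai-service/dataset/pipeline.py | assign_conflict_label
-- ===== SOURCE A (Python) =====
-- from typing import Any, Dict, Iterable, List, Optional, Tuple
--
-- SCHEDULE_CONFLICT_PRIORITY: Tuple[str, ...] = (
--     "platform_conflict",
--     "headway_conflict",
--     "delay_propagation_conflict",
--     "capacity_congestion_conflict",
--     "service_gap_conflict",
--     "schedule_inconsistency_conflict",
--     "transfer_timing_conflict",
-- )
--
-- def assign_conflict_label(row: dict) -> str:
--     flags = row.get("conflict_flags") or set()
--     if not isinstance(flags, set):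
--         flags = set(flags)
--     for label in SCHEDULE_CONFLICT_PRIORITY:
--         if label in flags:
--             return label
--     return "normal"
-- ===== SOURCE B (Python) =====
-- from typing import Any, Dict, Iterable, List, Optional, Tuple
--
-- SCHEDULE_CONFLICT_PRIORITY: Tuple[str, ...] = (
--     "platform_conflict",
--     "headway_conflict",
--     "delay_propagation_conflict",
--     "capacity_congestion_conflict",
--     "service_gap_conflict",
--     "schedule_inconsistency_conflict",
--     "transfer_timing_conflict",
-- )
--
-- _RANK: Dict[str, int] = {label: i for i, label in enumerate(SCHEDULE_CONFLICT_PRIORITY)}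
--
-- def assign_conflict_label(row: dict) -> str:
--     flags = row.get("conflict_flags") or set()
--     if not isinstance(flags, set):
--         flags = set(flags)
--     best = None
--     for f in flags:
--         r = _RANK.get(f)
--         if r is not None and (best is None or r < best):
--             best = r
--     return "normal" if best is None else SCHEDULE_CONFLICT_PRIORITY[best]
-- ===== Notes on version B (the rewrite author's own statement) =====
-- stated objective: alternative
-- what changed: Instead of scanning the fixed priority tuple for the first label present, B builds a label-to-rank table once and does one pass over the flag set keeping the minimal rank, returning the label at that rank (or 'normal' when no flag has a rank).
import Mathlib
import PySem

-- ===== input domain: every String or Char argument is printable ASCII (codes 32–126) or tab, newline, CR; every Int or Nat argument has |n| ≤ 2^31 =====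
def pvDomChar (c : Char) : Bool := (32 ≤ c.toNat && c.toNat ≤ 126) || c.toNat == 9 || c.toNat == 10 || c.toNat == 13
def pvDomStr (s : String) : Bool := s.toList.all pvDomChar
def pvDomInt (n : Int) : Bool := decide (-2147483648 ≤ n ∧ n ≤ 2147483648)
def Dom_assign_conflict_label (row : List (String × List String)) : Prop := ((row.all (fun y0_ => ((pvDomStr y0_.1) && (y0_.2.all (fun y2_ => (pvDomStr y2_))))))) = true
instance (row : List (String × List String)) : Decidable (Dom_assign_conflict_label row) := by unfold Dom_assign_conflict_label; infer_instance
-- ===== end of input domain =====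

-- B replaces A's scan over the fixed priority tuple by a rank table and a single
-- minimal-rank pass over the flag set (objective: alternative decomposition, same result).


-- ===== PORT A =====
-- SCHEDULE_CONFLICT_PRIORITY (shared module-level constant)
def pvPriority : List String :=
  ["platform_conflict", "headway_conflict", "delay_propagation_conflict",
   "capacity_congestion_conflict", "service_gap_conflict",
   "schedule_inconsistency_conflict", "transfer_timing_conflict"]

-- flags = row.get("conflict_flags") or set(); if not isinstance(flags, set): flags = set(flags)
-- (row.get: first-match lookup; 'or set()' maps a missing/empty value to the empty set;
--  set(flags) = PySem.Set.ofList; this preprocessing is identical in A and B by design)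
def pvFlags (row : List (String × List String)) : PySem.Set String :=
  PySem.Set.ofList ((PySem.Dict.mk row).get? "conflict_flags" |>.getD [])

-- for label in SCHEDULE_CONFLICT_PRIORITY: if label in flags: return label / return "normal"
def pvScan (flags : List String) : List String → String
  | [] => "normal"
  | l :: rest => if flags.contains l then l else pvScan flags rest

def assign_conflict_label (row : List (String × List String)) : String :=
  pvScan (pvFlags row) pvPriority

-- ===== PORT B =====
-- _RANK = {label: i for i, label in enumerate(SCHEDULE_CONFLICT_PRIORITY)}
def pvRank : PySem.Dict String Int :=
  PySem.Dict.mk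
    [("platform_conflict", 0), ("headway_conflict", 1), ("delay_propagation_conflict", 2),
     ("capacity_congestion_conflict", 3), ("service_gap_conflict", 4),
     ("schedule_inconsistency_conflict", 5), ("transfer_timing_conflict", 6)]

-- loop body: r = _RANK.get(f); if r is not None and (best is None or r < best): best = r
def pvStep (best : Option Int) (f : String) : Option Int :=
  match pvRank.get? f with
  | some r =>
    match best with
    | none => some r
    | some b => if r < b then some r else some b
  | none => best

def pvBest (flags : List String) : Option Int :=
  flags.foldl pvStep none

-- return "normal" if best is None else SCHEDULE_CONFLICT_PRIORITY[best]
-- (the index is always in range — proved below — so the .getD "" default is never used)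
def assign_conflict_label_alt (row : List (String × List String)) : String :=
  match pvBest (pvFlags row) with
  | none => "normal"
  | some b => (PySem.List.pyGet? pvPriority b).getD ""

-- ===== PRECONDITION & SPEC =====
def Spec_assign_conflict_label (row : List (String × List String)) (out : String) : Prop := out = assign_conflict_label_alt row
instance (row : List (String × List String)) (out : String) : Decidable (Spec_assign_conflict_label row out) := by unfold Spec_assign_conflict_label; infer_instance

-- ===== CLAIM (what is proved, stated in full; the proofs are below) =====
def Claim_equal_assign_conflict_label : Prop := ∀ (row : List (String × List String)), Dom_assign_conflict_label row → Spec_assign_conflict_label row (assign_conflict_label row)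

-- ===== LEMMAS AND PROOFS =====

-- the rank table is exactly index-in-priority-list
lemma rank_cases (f : String) (r : Int) (h : pvRank.get? f = some r) :
    (f = "platform_conflict" ∧ r = 0) ∨ (f = "headway_conflict" ∧ r = 1) ∨
    (f = "delay_propagation_conflict" ∧ r = 2) ∨ (f = "capacity_congestion_conflict" ∧ r = 3) ∨
    (f = "service_gap_conflict" ∧ r = 4) ∨ (f = "schedule_inconsistency_conflict" ∧ r = 5) ∨
    (f = "transfer_timing_conflict" ∧ r = 6) := by
  simp only [pvRank, PySem.Dict.get?_mk_cons] at h
  split_ifs at h with h1 h2 h3 h4 h5 h6 h7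
  · exact Or.inl ⟨(eq_of_beq h1).symm, by injection h with h'; omega⟩
  · exact Or.inr (Or.inl ⟨(eq_of_beq h2).symm, by injection h with h'; omega⟩)
  · exact Or.inr (Or.inr (Or.inl ⟨(eq_of_beq h3).symm, by injection h with h'; omega⟩))
  · exact Or.inr (Or.inr (Or.inr (Or.inl ⟨(eq_of_beq h4).symm, by injection h with h'; omega⟩)))
  · exact Or.inr (Or.inr (Or.inr (Or.inr (Or.inl ⟨(eq_of_beq h5).symm, by injection h with h'; omega⟩))))
  · exact Or.inr (Or.inr (Or.inr (Or.inr (Or.inr (Or.inl ⟨(eq_of_beq h6).symm, by injection h with h'; omega⟩)))))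
  · exact Or.inr (Or.inr (Or.inr (Or.inr (Or.inr (Or.inr ⟨(eq_of_beq h7).symm, by injection h with h'; omega⟩)))))
  · exact absurd h (by simp [PySem.Dict.get?])

-- reduction facts about one loop step
lemma pvStep_rank_none {f : String} (acc : Option Int) (h : pvRank.get? f = none) :
    pvStep acc f = acc := by unfold pvStep; rw [h]

lemma pvStep_rank_some_none {f : String} {r : Int} (h : pvRank.get? f = some r) :
    pvStep none f = some r := by unfold pvStep; rw [h]

lemma pvStep_rank_some_some {f : String} {r : Int} (a : Int) (h : pvRank.get? f = some r) :
    pvStep (some a) f = some (min r a) := by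
  unfold pvStep; rw [h]; dsimp only; split_ifs with hlt <;> (congr 1; omega)

-- the fold's full characterisation, induction on the flag list with a general accumulator
lemma fold_spec (flags : List String) : ∀ acc : Option Int,
    (flags.foldl pvStep acc = none → acc = none ∧ ∀ f ∈ flags, pvRank.get? f = none) ∧
    (∀ b, flags.foldl pvStep acc = some b →
      (acc = some b ∨ ∃ f ∈ flags, pvRank.get? f = some b) ∧
      (∀ a, acc = some a → b ≤ a) ∧
      (∀ f ∈ flags, ∀ r, pvRank.get? f = some r → b ≤ r)) := by
  induction flags with
  | nil =>
    intro acc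
    constructor
    · intro h; exact ⟨h, by simp⟩
    · intro b hb
      simp only [List.foldl_nil] at hb
      refine ⟨Or.inl hb, ?_, by simp⟩
      intro a ha; rw [hb] at ha; injection ha with h'; omega
  | cons f rest ih =>
    intro acc
    have H := ih (pvStep acc f)
    constructor
    · intro hnone
      rw [List.foldl_cons] at hnone
      obtain ⟨hstep, hall⟩ := H.1 hnone
      have hacc : acc = none ∧ pvRank.get? f = none := by
        rcases hrf : pvRank.get? f with _ | r
        · rw [pvStep_rank_none acc hrf] at hstep; exact ⟨hstep, rfl⟩
        · cases acc with
          | none => rw [pvStep_rank_some_none hrf] at hstep; exact absurd hstep (by simp)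
          | some a => rw [pvStep_rank_some_some a hrf] at hstep; exact absurd hstep (by simp)
      refine ⟨hacc.1, ?_⟩
      intro g hg
      rcases List.mem_cons.mp hg with hg | hg
      · subst hg; exact hacc.2
      · exact hall g hg
    · intro b hb
      rw [List.foldl_cons] at hb
      obtain ⟨hsrc, hle, hall⟩ := (H.2 b) hb
      refine ⟨?_, ?_, ?_⟩
      · rcases hsrc with hsrc | ⟨g, hg, hgr⟩
        · -- the value b came out of pvStep acc f
          rcases hrf : pvRank.get? f with _ | r
          · rw [pvStep_rank_none acc hrf] at hsrc; exact Or.inl hsrc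
          · cases acc with
            | none =>
              rw [pvStep_rank_some_none hrf] at hsrc
              right; exact ⟨f, by simp, by rw [hrf]; injection hsrc with h'; rw [h']⟩
            | some a =>
              rw [pvStep_rank_some_some a hrf] at hsrc
              injection hsrc with h'
              rcases le_total r a with hra | hra
              · right
                refine ⟨f, by simp, ?_⟩
                rw [hrf]; congr 1; omega
              · left; congr 1; omega
        · right; exact ⟨g, List.mem_cons_of_mem f hg, hgr⟩
      · intro a ha
        subst ha
        rcases hrf : pvRank.get? f with _ | r
        · exact hle a (pvStep_rank_none _ hrf)
        · have := hle (min r a) (pvStep_rank_some_some a hrf)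
          omega
      · intro g hg r hgr
        rcases List.mem_cons.mp hg with hg | hg
        · subst hg
          cases acc with
          | none => exact hle r (pvStep_rank_some_none hgr)
          | some a =>
            have := hle (min r a) (pvStep_rank_some_some a hgr)
            omega
        · exact hall g hg r hgr

-- membership of a priority label forces its rank (literal facts)
lemma rank_lit0 : pvRank.get? "platform_conflict" = some 0 := by decide
lemma rank_lit1 : pvRank.get? "headway_conflict" = some 1 := by decide
lemma rank_lit2 : pvRank.get? "delay_propagation_conflict" = some 2 := by decide
lemma rank_lit3 : pvRank.get? "capacity_congestion_conflict" = some 3 := by decide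
lemma rank_lit4 : pvRank.get? "service_gap_conflict" = some 4 := by decide
lemma rank_lit5 : pvRank.get? "schedule_inconsistency_conflict" = some 5 := by decide
lemma rank_lit6 : pvRank.get? "transfer_timing_conflict" = some 6 := by decide

-- core equivalence on an arbitrary flag list
lemma scan_eq_best (flags : List String) :
    pvScan flags pvPriority =
      (match pvBest flags with
       | none => "normal"
       | some b => (PySem.List.pyGet? pvPriority b).getD "") := by
  have H := fold_spec flags none
  rcases hb : pvBest flags with _ | b
  · -- no flag has a rank: no priority label is in flags
    have hall := (H.1 (by simpa [pvBest] using hb)).2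
    have nmem : ∀ l, pvRank.get? l ≠ none → l ∉ flags := by
      intro l hl hmem; exact hl (hall l hmem)
    have n0 := nmem _ (by rw [rank_lit0]; simp)
    have n1 := nmem _ (by rw [rank_lit1]; simp)
    have n2 := nmem _ (by rw [rank_lit2]; simp)
    have n3 := nmem _ (by rw [rank_lit3]; simp)
    have n4 := nmem _ (by rw [rank_lit4]; simp)
    have n5 := nmem _ (by rw [rank_lit5]; simp)
    have n6 := nmem _ (by rw [rank_lit6]; simp)
    simp [pvScan, pvPriority, n0, n1, n2, n3, n4, n5, n6]
  · obtain ⟨hsrc, -, hmin⟩ := (H.2 b) (by simpa [pvBest] using hb)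
    rcases hsrc with hsrc | ⟨g, hg, hgr⟩
    · exact absurd hsrc (by simp)
    have hnotbefore : ∀ l r, pvRank.get? l = some r → r < b → l ∉ flags := by
      intro l r hl hr hmem
      exact absurd (hmin l hmem r hl) (by omega)
    rcases rank_cases g b hgr with ⟨hf, hr⟩ | ⟨hf, hr⟩ | ⟨hf, hr⟩ | ⟨hf, hr⟩ | ⟨hf, hr⟩ | ⟨hf, hr⟩ | ⟨hf, hr⟩ <;> subst hf <;> subst hr
    · -- b = 0
      simp [pvScan, pvPriority, hg, PySem.List.pyGet?, PySem.List.pyIdx?]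
    · -- b = 1
      have c0 : "platform_conflict" ∉ flags := hnotbefore _ _ rank_lit0 (by norm_num)
      simp [pvScan, pvPriority, hg, c0, PySem.List.pyGet?, PySem.List.pyIdx?]
    · -- b = 2
      have c0 : "platform_conflict" ∉ flags := hnotbefore _ _ rank_lit0 (by norm_num)
      have c1 : "headway_conflict" ∉ flags := hnotbefore _ _ rank_lit1 (by norm_num)
      simp [pvScan, pvPriority, hg, c0, c1, PySem.List.pyGet?, PySem.List.pyIdx?]
    · -- b = 3
      have c0 : "platform_conflict" ∉ flags := hnotbefore _ _ rank_lit0 (by norm_num)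
      have c1 : "headway_conflict" ∉ flags := hnotbefore _ _ rank_lit1 (by norm_num)
      have c2 : "delay_propagation_conflict" ∉ flags := hnotbefore _ _ rank_lit2 (by norm_num)
      simp [pvScan, pvPriority, hg, c0, c1, c2, PySem.List.pyGet?, PySem.List.pyIdx?]
    · -- b = 4
      have c0 : "platform_conflict" ∉ flags := hnotbefore _ _ rank_lit0 (by norm_num)
      have c1 : "headway_conflict" ∉ flags := hnotbefore _ _ rank_lit1 (by norm_num)
      have c2 : "delay_propagation_conflict" ∉ flags := hnotbefore _ _ rank_lit2 (by norm_num)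
      have c3 : "capacity_congestion_conflict" ∉ flags := hnotbefore _ _ rank_lit3 (by norm_num)
      simp [pvScan, pvPriority, hg, c0, c1, c2, c3, PySem.List.pyGet?, PySem.List.pyIdx?]
    · -- b = 5
      have c0 : "platform_conflict" ∉ flags := hnotbefore _ _ rank_lit0 (by norm_num)
      have c1 : "headway_conflict" ∉ flags := hnotbefore _ _ rank_lit1 (by norm_num)
      have c2 : "delay_propagation_conflict" ∉ flags := hnotbefore _ _ rank_lit2 (by norm_num)
      have c3 : "capacity_congestion_conflict" ∉ flags := hnotbefore _ _ rank_lit3 (by norm_num)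
      have c4 : "service_gap_conflict" ∉ flags := hnotbefore _ _ rank_lit4 (by norm_num)
      simp [pvScan, pvPriority, hg, c0, c1, c2, c3, c4, PySem.List.pyGet?, PySem.List.pyIdx?]
    · -- b = 6
      have c0 : "platform_conflict" ∉ flags := hnotbefore _ _ rank_lit0 (by norm_num)
      have c1 : "headway_conflict" ∉ flags := hnotbefore _ _ rank_lit1 (by norm_num)
      have c2 : "delay_propagation_conflict" ∉ flags := hnotbefore _ _ rank_lit2 (by norm_num)
      have c3 : "capacity_congestion_conflict" ∉ flags := hnotbefore _ _ rank_lit3 (by norm_num)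
      have c4 : "service_gap_conflict" ∉ flags := hnotbefore _ _ rank_lit4 (by norm_num)
      have c5 : "schedule_inconsistency_conflict" ∉ flags := hnotbefore _ _ rank_lit5 (by norm_num)
      simp [pvScan, pvPriority, hg, c0, c1, c2, c3, c4, c5, PySem.List.pyGet?, PySem.List.pyIdx?]

-- ===== VERDICT (by name: the statement is the Claim_ definition above) =====
theorem assign_conflict_label_spec : Claim_equal_assign_conflict_label := by
  intro row _
  unfold Spec_assign_conflict_label assign_conflict_label assign_conflict_label_alt
  exact scan_eq_best (pvFlags row)
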